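-- pv_equiv track=rewrite | github.com/thuzax/vrp-solver | server_requests/src/server_requests_util.py | get_non_planned_requests
-- ===== SOURCE A (Python) =====
-- def get_non_planned_requests(all_requets, routes):
--     non_planned_requests = set()
--     for request in all_requets:
--         found = False
--         for vehicle, route in routes.items():
--             for i in route:
--                 if (i in request):
--                     found = True
--         if (not found):
--             non_planned_requests.add(request)
--
--     return non_planned_requests
-- ===== SOURCE B (Python) =====
-- def get_non_planned_requests(all_requets, routes):
--     nodes = set()
--     for route in routes.values():
--         nodes.update(route)
--     return {request for request in all_requets if nodes.isdisjoint(request)}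
-- ===== Notes on version B (the rewrite author's own statement) =====
-- stated objective: faster
-- what changed: B precomputes the set of all scheduled route nodes once and keeps each request iff it is disjoint from that set, instead of A's rescan of every route node against every request.
import Mathlib
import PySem

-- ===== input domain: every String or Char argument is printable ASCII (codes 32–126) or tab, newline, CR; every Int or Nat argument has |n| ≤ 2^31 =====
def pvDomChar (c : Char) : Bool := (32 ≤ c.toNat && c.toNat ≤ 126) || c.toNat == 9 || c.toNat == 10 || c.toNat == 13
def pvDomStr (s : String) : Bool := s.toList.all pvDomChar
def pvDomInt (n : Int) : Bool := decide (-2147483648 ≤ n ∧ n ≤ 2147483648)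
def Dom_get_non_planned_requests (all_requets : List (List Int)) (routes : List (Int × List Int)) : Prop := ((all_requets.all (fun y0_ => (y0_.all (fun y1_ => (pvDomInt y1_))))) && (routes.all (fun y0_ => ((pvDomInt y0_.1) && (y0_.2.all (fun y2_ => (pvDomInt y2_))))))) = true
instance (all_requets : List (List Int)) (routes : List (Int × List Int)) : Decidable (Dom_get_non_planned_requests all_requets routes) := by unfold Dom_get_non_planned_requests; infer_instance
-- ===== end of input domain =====

-- B precomputes the set of all scheduled route nodes once and keeps each request iff it is
-- disjoint from that set (objective: faster — one pass over the route nodes instead of a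
-- rescan of every route node for every request).

-- ===== PORT A =====
def get_non_planned_requests (all_requets : List (List Int)) (routes : List (Int × List Int)) : List (List Int) :=
  all_requets.foldl (fun non_planned_requests request =>
      -- found = False; for vehicle, route in routes.items(): for i in route: if i in request: found = True
      let found := (PySem.Dict.ofList routes).items.foldl (fun found p =>
          p.2.foldl (fun found i => if request.contains i then true else found) found) false
      if found then non_planned_requests else PySem.Set.add non_planned_requests request)
    PySem.Set.empty

-- ===== PORT B =====
def get_non_planned_requests_alt (all_requets : List (List Int)) (routes : List (Int × List Int)) : List (List Int) :=
  -- nodes = set(); for route in routes.values(): nodes.update(route)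
  let nodes := (PySem.Dict.ofList routes).values.foldl (fun s route => PySem.Set.update s route) PySem.Set.empty
  -- {request for request in all_requets if nodes.isdisjoint(request)}
  PySem.Set.ofList (all_requets.filter (fun request => PySem.Set.isdisjoint nodes request))

-- ===== PRECONDITION & SPEC =====
def Spec_get_non_planned_requests (all_requets : List (List Int)) (routes : List (Int × List Int)) (out : List (List Int)) : Prop := out = get_non_planned_requests_alt all_requets routes
instance (all_requets : List (List Int)) (routes : List (Int × List Int)) (out : List (List Int)) : Decidable (Spec_get_non_planned_requests all_requets routes out) := by unfold Spec_get_non_planned_requests; infer_instance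

-- ===== CLAIM (what is proved, stated in full; the proofs are below) =====
def Claim_equal_get_non_planned_requests : Prop := ∀ (all_requets : List (List Int)) (routes : List (Int × List Int)), Dom_get_non_planned_requests all_requets routes → Spec_get_non_planned_requests all_requets routes (get_non_planned_requests all_requets routes)

-- ===== LEMMAS AND PROOFS =====

-- the 'if c x then true else f' accumulator is 'initial or any'
theorem foldl_if_true {α : Type} (c : α → Bool) (l : List α) (b : Bool) :
    l.foldl (fun f x => if c x then true else f) b = (b || l.any c) := by
  induction l generalizing b with
  | nil => simp
  | cons x xs ih =>
      rw [List.foldl_cons, List.any_cons, ih]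
      cases c x <;> cases b <;> simp

-- A's nested found-loop is an 'any' over the items
theorem found_eq_any (request : List Int) (items : List (Int × List Int)) (b : Bool) :
    items.foldl (fun found p =>
        p.2.foldl (fun found i => if request.contains i then true else found) found) b
      = (b || items.any (fun p => p.2.any (fun i => request.contains i))) := by
  induction items generalizing b with
  | nil => simp
  | cons p ps ih =>
      rw [List.foldl_cons, foldl_if_true, ih, List.any_cons, Bool.or_assoc]

-- membership in the accumulated node set
theorem mem_foldl_update {α : Type} [BEq α] [LawfulBEq α] (l : List (List α)) (s : PySem.Set α) (x : α) :
    x ∈ l.foldl (fun s r => PySem.Set.update s r) s ↔ x ∈ s ∨ ∃ r ∈ l, x ∈ r := by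
  induction l generalizing s with
  | nil => simp
  | cons r rs ih =>
      rw [List.foldl_cons, ih]
      simp [PySem.Set.mem_update, or_assoc]

-- A's conditional add-loop is an update by the filtered list
theorem foldl_add_ifnot {α : Type} [BEq α] (p : α → Bool) (l : List α) (s : PySem.Set α) :
    l.foldl (fun s r => if p r then s else PySem.Set.add s r) s
      = PySem.Set.update s (l.filter (fun r => !p r)) := by
  induction l generalizing s with
  | nil => rfl
  | cons r rs ih =>
      by_cases h : p r = true <;>
        simp [List.foldl_cons, h, ih, PySem.Set.update_cons]

-- isdisjoint is false exactly when the two have a common element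
theorem isdisjoint_false_iff {α : Type} [BEq α] [LawfulBEq α] (s : PySem.Set α) (t : List α) :
    PySem.Set.isdisjoint s t = false ↔ ∃ x ∈ s, x ∈ t := by
  constructor
  · intro h
    by_contra hno
    push Not at hno
    have ht : PySem.Set.isdisjoint s t = true := (PySem.Set.isdisjoint_iff s t).mpr hno
    rw [ht] at h
    exact Bool.noConfusion h
  · rintro ⟨x, hx, hxt⟩
    by_contra h
    have ht : PySem.Set.isdisjoint s t = true := by
      revert h
      cases PySem.Set.isdisjoint s t <;> simp
    exact ((PySem.Set.isdisjoint_iff s t).mp ht x hx) hxt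

-- A's found flag is the negation of B's disjointness test
theorem found_eq_not_disjoint (request : List Int) (routes : List (Int × List Int)) :
    ((PySem.Dict.ofList routes).items.any (fun p => p.2.any (fun i => request.contains i)))
      = !(PySem.Set.isdisjoint
            ((PySem.Dict.ofList routes).values.foldl (fun s route => PySem.Set.update s route) PySem.Set.empty)
            request) := by
  rw [Bool.eq_iff_iff, Bool.not_eq_true', isdisjoint_false_iff]
  simp only [List.any_eq_true, List.contains_iff_mem]
  constructor
  · rintro ⟨p, hp, i, hi, hir⟩
    exact ⟨i, (mem_foldl_update _ _ _).mpr (Or.inr ⟨p.2, List.mem_map_of_mem hp, hi⟩), hir⟩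
  · rintro ⟨x, hx, hxr⟩
    rcases (mem_foldl_update _ _ _).mp hx with h0 | ⟨r, hr, hxr'⟩
    · cases h0
    · rcases List.mem_map.mp hr with ⟨p, hp, rfl⟩
      exact ⟨p, hp, x, hxr', hxr⟩

-- ===== VERDICT (by name: the statement is the Claim_ definition above) =====
theorem get_non_planned_requests_spec : Claim_equal_get_non_planned_requests := by
  intro all_requets routes _
  unfold Spec_get_non_planned_requests get_non_planned_requests get_non_planned_requests_alt
  simp only [found_eq_any, Bool.false_or]
  rw [foldl_add_ifnot, PySem.Set.update_empty]
  congr 1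
  apply List.filter_congr
  intro r _
  rw [found_eq_not_disjoint, Bool.not_not]
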